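-- pv_equiv track=rewrite | github.com/SteffieJoosen/llvm-project | llvm/utils/TableGen/MemoryTraceGeneration/generate_mem_trace.py | find_instruction_lines_vcd
-- ===== SOURCE A (Python) =====
-- INDEX_INST = 2
--
-- def split(string):
--     list_of_words = []
--     space_passed = False
--     word = ""
--     for i in string:
--         if i == ' ':
--             space_passed = True
--         elif space_passed and i != ' ':
--             list_of_words.append(word)
--             word = str(i)
--             space_passed = False
--         elif  not space_passed and i != ' ':
--             word += str(i)
--     list_of_words.append(word)
--     return list_of_words
--
-- def find_instruction_lines_vcd(new_lines, start_instruction, no_instr_to_analyse):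
--     instr_lines = []
--     instr_to_analyse = ""
--     lines_skipped = 0
--     no_instr_found = 0
--     start_last_instr = 0
--     for i in range(len(new_lines)):
--         if not new_lines[i] == "":
--             current_instruction = split(new_lines[i])[INDEX_INST]
--             if i - lines_skipped == start_instruction:
--                 no_instr_found = 1
--                 instr_to_analyse = current_instruction
--             if 1 <= no_instr_found <= no_instr_to_analyse:
--                 if current_instruction == instr_to_analyse:
--                     instr_lines.append(new_lines[i])
--                 else:
--                     no_instr_found +=1
--                     instr_to_analyse = current_instruction
--                     if no_instr_found <= no_instr_to_analyse:
--                         instr_lines.append(new_lines[i])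
--                         start_last_instr = len(instr_lines)-1
--         else:
--             lines_skipped +=1
--
--     return instr_lines, start_last_instr
-- ===== SOURCE B (Python) =====
-- INDEX_INST = 2
--
-- def split(string):
--     # the module's custom splitter, kept verbatim: its exact word boundaries matter
--     list_of_words = []
--     space_passed = False
--     word = ""
--     for i in string:
--         if i == ' ':
--             space_passed = True
--         elif space_passed and i != ' ':
--             list_of_words.append(word)
--             word = str(i)
--             space_passed = False
--         elif  not space_passed and i != ' ':
--             word += str(i)
--     list_of_words.append(word)
--     return list_of_words
--
-- def find_instruction_lines_vcd(new_lines, start_instruction, no_instr_to_analyse):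
--     tagged = [(line, split(line)[INDEX_INST]) for line in new_lines if line != ""]
--     if not (0 <= start_instruction < len(tagged)) or no_instr_to_analyse < 1:
--         return [], 0
--     out = []
--     groups = 0
--     cur = None
--     start_last = 0
--     for line, ident in tagged[start_instruction:]:
--         if ident != cur:
--             groups += 1
--             if groups > no_instr_to_analyse:
--                 break
--             cur = ident
--             start_last = len(out)
--         out.append(line)
--     return out, start_last
-- ===== Notes on version B (the rewrite author's own statement) =====
-- stated objective: simpler
-- what changed: A's single stateful scan with a lines_skipped counter, a trigger condition and a monotone no_instr_found counter is replaced by a two-phase decomposition: first tag all non-empty lines with their instruction id, then slice at start_instruction and run one plain grouping loop with an early break.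
import Mathlib
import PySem

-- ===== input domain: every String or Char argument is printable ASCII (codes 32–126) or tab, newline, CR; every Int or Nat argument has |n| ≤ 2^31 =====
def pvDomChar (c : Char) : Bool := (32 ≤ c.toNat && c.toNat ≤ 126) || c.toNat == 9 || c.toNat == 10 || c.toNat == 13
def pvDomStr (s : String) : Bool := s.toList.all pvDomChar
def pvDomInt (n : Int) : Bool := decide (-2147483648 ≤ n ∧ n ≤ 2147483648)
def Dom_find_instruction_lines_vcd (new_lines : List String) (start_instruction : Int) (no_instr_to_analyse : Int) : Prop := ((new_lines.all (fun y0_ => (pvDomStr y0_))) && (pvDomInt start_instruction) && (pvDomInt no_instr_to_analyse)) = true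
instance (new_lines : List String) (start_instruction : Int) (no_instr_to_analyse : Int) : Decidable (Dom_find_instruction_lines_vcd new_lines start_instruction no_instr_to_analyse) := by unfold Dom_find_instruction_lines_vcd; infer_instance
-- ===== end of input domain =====

-- B replaces A's single stateful scan (trigger arithmetic + monotone counter) by tag-the-non-empty-lines,
-- slice at start_instruction, then one plain grouping loop with an early break; objective: simpler.

-- ===== PORT A =====

-- the module's custom split, ported by hand over toList (exact: char-by-char, same branches);
-- words are kept as List Char (Python strings used only for equality / indexing here)
def pvSplit (s : String) : List (List Char) :=
  let st := s.toList.foldl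
    (fun (st : List (List Char) × Bool × List Char) i =>
      match st with
      | (list_of_words, space_passed, word) =>
        if i = ' ' then (list_of_words, true, word)
        else if space_passed then (list_of_words ++ [word], false, [i])
        else (list_of_words, space_passed, word ++ [i]))
    ([], false, [])
  st.1 ++ [st.2.2]

-- split(line)[INDEX_INST]; the (never hit inside Pre_) default [] stands for Python's IndexError
def pvIdOf (line : String) : List Char := (PySem.List.pyGet? (pvSplit line) 2).getD []

-- the `for i in range(len(new_lines))` loop of A, step for step
def pvAuxA (s n : Int) : List String → Int → Int → List String → List Char → Int → Int → List String × Int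
  | [], _, _, instr_lines, _, _, start_last => (instr_lines, start_last)
  | line :: rest, i, lines_skipped, instr_lines, instr_to_analyse, no_instr_found, start_last =>
    if line = "" then
      pvAuxA s n rest (i+1) (lines_skipped+1) instr_lines instr_to_analyse no_instr_found start_last
    else
      let cur := pvIdOf line
      let nf := if i - lines_skipped = s then (1 : Int) else no_instr_found
      let ita := if i - lines_skipped = s then cur else instr_to_analyse
      if 1 ≤ nf ∧ nf ≤ n then
        if cur = ita then
          pvAuxA s n rest (i+1) lines_skipped (instr_lines ++ [line]) ita nf start_last
        else
          if nf + 1 ≤ n then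
            pvAuxA s n rest (i+1) lines_skipped (instr_lines ++ [line]) cur (nf+1)
              (((instr_lines ++ [line]).length : Int) - 1)
          else
            pvAuxA s n rest (i+1) lines_skipped instr_lines cur (nf+1) start_last
      else
        pvAuxA s n rest (i+1) lines_skipped instr_lines ita nf start_last

def find_instruction_lines_vcd (new_lines : List String) (start_instruction : Int) (no_instr_to_analyse : Int) : List String × Int :=
  pvAuxA start_instruction no_instr_to_analyse new_lines 0 0 [] [] 0 0

-- ===== PORT B =====

-- B's grouping loop over the tagged slice, with the early break
def pvBLoop (n : Int) : List (String × List Char) → List String → Int → Option (List Char) → Int → List String × Int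
  | [], out, _, _, start_last => (out, start_last)
  | (line, ident) :: rest, out, groups, cur, start_last =>
    if some ident ≠ cur then
      if groups + 1 > n then (out, start_last)
      else pvBLoop n rest (out ++ [line]) (groups + 1) (some ident) (out.length : Int)
    else pvBLoop n rest (out ++ [line]) groups cur start_last

def find_instruction_lines_vcd_alt (new_lines : List String) (start_instruction : Int) (no_instr_to_analyse : Int) : List String × Int :=
  let tagged := (new_lines.filter (fun l => l != "")).map (fun l => (l, pvIdOf l))
  if ¬(0 ≤ start_instruction ∧ start_instruction < (tagged.length : Int)) ∨ no_instr_to_analyse < 1 then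
    ([], 0)
  else
    pvBLoop no_instr_to_analyse (tagged.drop start_instruction.toNat) [] 0 none 0

-- ===== PRECONDITION & SPEC =====
-- Pre_ excludes exactly the inputs where Python A raises IndexError: some non-empty line whose
-- custom split has fewer than 3 words (split(line)[2] out of range).
def Pre_find_instruction_lines_vcd (new_lines : List String) (start_instruction : Int) (no_instr_to_analyse : Int) : Prop :=
  ∀ l ∈ new_lines, l ≠ "" → 3 ≤ (pvSplit l).length
instance (new_lines : List String) (start_instruction : Int) (no_instr_to_analyse : Int) : Decidable (Pre_find_instruction_lines_vcd new_lines start_instruction no_instr_to_analyse) := by unfold Pre_find_instruction_lines_vcd; infer_instance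

def pvWitness_find_instruction_lines_vcd : List String × Int × Int := (["a 0 x", "a 0 x", "b 1 y"], 0, 2)

def Spec_find_instruction_lines_vcd (new_lines : List String) (start_instruction : Int) (no_instr_to_analyse : Int) (out : List String × Int) : Prop := out = find_instruction_lines_vcd_alt new_lines start_instruction no_instr_to_analyse
instance (new_lines : List String) (start_instruction : Int) (no_instr_to_analyse : Int) (out : List String × Int) : Decidable (Spec_find_instruction_lines_vcd new_lines start_instruction no_instr_to_analyse out) := by unfold Spec_find_instruction_lines_vcd; infer_instance

-- ===== CLAIM (what is proved, stated in full; the proofs are below) =====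
def Claim_equal_find_instruction_lines_vcd : Prop := ∀ (new_lines : List String) (start_instruction : Int) (no_instr_to_analyse : Int), Dom_find_instruction_lines_vcd new_lines start_instruction no_instr_to_analyse → Pre_find_instruction_lines_vcd new_lines start_instruction no_instr_to_analyse → Spec_find_instruction_lines_vcd new_lines start_instruction no_instr_to_analyse (find_instruction_lines_vcd new_lines start_instruction no_instr_to_analyse)

-- ===== LEMMAS AND PROOFS =====

-- A's loop re-expressed over the non-empty lines only, with d standing for i - lines_skipped
def pvNE (s n : Int) : List String → Int → List String → List Char → Int → Int → List String × Int
  | [], _, out, _, _, sl => (out, sl)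
  | line :: rest, d, out, ita, nf0, sl =>
    let cur := pvIdOf line
    let nf := if d = s then (1 : Int) else nf0
    let ita' := if d = s then cur else ita
    if 1 ≤ nf ∧ nf ≤ n then
      if cur = ita' then pvNE s n rest (d+1) (out ++ [line]) ita' nf sl
      else
        if nf + 1 ≤ n then pvNE s n rest (d+1) (out ++ [line]) cur (nf+1) (((out ++ [line]).length : Int) - 1)
        else pvNE s n rest (d+1) out cur (nf+1) sl
    else pvNE s n rest (d+1) out ita' nf sl

theorem pvAuxA_eq_pvNE (s n : Int) (lines : List String) :
    ∀ (i ls : Int) (out : List String) (ita : List Char) (nf sl : Int),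
    pvAuxA s n lines i ls out ita nf sl = pvNE s n (lines.filter (fun l => l != "")) (i - ls) out ita nf sl := by
  induction lines with
  | nil => intro i ls out ita nf sl; simp [pvAuxA, pvNE]
  | cons line rest ih =>
    intro i ls out ita nf sl
    by_cases hl : line = ""
    · have : (i + 1) - (ls + 1) = i - ls := by ring
      simp [pvAuxA, hl, ih, this]
    · have harith : (i + 1) - ls = (i - ls) + 1 := by ring
      simp only [pvAuxA, pvNE, hl, List.filter_cons,
        show (line != "") = true by simpa using hl]
      simp only [ih, harith]
      simp [pvNE]

-- once past the trigger with the counter outside [1, n], A's loop changes nothing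
theorem pvNE_dead (s n : Int) (rest : List String) :
    ∀ (d : Int) (out : List String) (ita : List Char) (nf sl : Int),
    s < d → (nf < 1 ∨ n < nf) → pvNE s n rest d out ita nf sl = (out, sl) := by
  induction rest with
  | nil => intro d out ita nf sl _ _; simp [pvNE]
  | cons line t ih =>
    intro d out ita nf sl hd hnf
    have hds : ¬ d = s := by omega
    have hcond : ¬ (1 ≤ nf ∧ nf ≤ n) := by omega
    simp only [pvNE, if_neg hds, if_neg hcond]
    exact ih (d+1) out ita nf sl (by omega) hnf

-- before the trigger the loop only advances d
theorem pvNE_pre (s n : Int) (g : List String) :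
    ∀ (d : Int) (ita : List Char), d ≤ s →
    pvNE s n g d [] ita 0 0 = pvNE s n (g.drop (s - d).toNat) s [] ita 0 0 := by
  induction g with
  | nil => intro d ita _; simp [pvNE]
  | cons line t ih =>
    intro d ita hds
    by_cases hd : d = s
    · subst hd; simp
    · have hlt : d < s := lt_of_le_of_ne hds hd
      have hcond : ¬ ((1 : Int) ≤ 0 ∧ (0 : Int) ≤ n) := by omega
      have hstep : (s - d).toNat = (s - (d+1)).toNat + 1 := by omega
      simp only [pvNE, if_neg hd, if_neg hcond]
      rw [ih (d+1) ita (by omega), hstep, List.drop_succ_cons]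

-- after the trigger, A's loop is exactly B's grouping loop
theorem pvNE_main (s n : Int) (rest : List String) :
    ∀ (d : Int) (out : List String) (ita : List Char) (nf sl : Int),
    s < d → 1 ≤ nf → nf ≤ n →
    pvNE s n rest d out ita nf sl =
      pvBLoop n (rest.map (fun l => (l, pvIdOf l))) out nf (some ita) sl := by
  induction rest with
  | nil => intro d out ita nf sl _ _ _; simp [pvNE, pvBLoop]
  | cons line t ih =>
    intro d out ita nf sl hd h1 h2
    have hds : ¬ d = s := by omega
    have hcond : (1 ≤ nf ∧ nf ≤ n) := ⟨h1, h2⟩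
    simp only [pvNE, List.map_cons, pvBLoop, if_neg hds, if_pos hcond]
    by_cases heq : pvIdOf line = ita
    · have hB : ¬ (some (pvIdOf line) ≠ some ita) := by simp [heq]
      rw [if_pos heq, if_neg hB]
      exact ih (d+1) (out ++ [line]) ita nf sl (by omega) h1 h2
    · have hne : some (pvIdOf line) ≠ some ita := by simpa using heq
      rw [if_neg heq, if_pos hne]
      by_cases hlim : nf + 1 ≤ n
      · rw [if_pos hlim, if_neg (show ¬ (nf + 1 > n) by omega)]
        have hlen : ((out ++ [line]).length : Int) - 1 = (out.length : Int) := by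
          simp
        rw [hlen]
        exact ih (d+1) (out ++ [line]) (pvIdOf line) (nf+1) (out.length : Int) (by omega) (by omega) hlim
      · rw [if_neg hlim, if_pos (show nf + 1 > n by omega)]
        exact pvNE_dead s n t (d+1) out (pvIdOf line) (nf+1) sl (by omega) (by omega)

-- ===== VERDICT (by name: the statement is the Claim_ definition above) =====
theorem find_instruction_lines_vcd_spec : Claim_equal_find_instruction_lines_vcd := by
  unfold Claim_equal_find_instruction_lines_vcd
  intro lines s n _ _
  unfold Spec_find_instruction_lines_vcd find_instruction_lines_vcd find_instruction_lines_vcd_alt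
  have hA := pvAuxA_eq_pvNE s n lines 0 0 [] [] 0 0
  simp only [show (0 : Int) - 0 = 0 by ring] at hA
  set g := lines.filter (fun l => l != "") with hg
  by_cases hs0 : 0 ≤ s
  · by_cases hsl : s < (g.length : Int)
    · -- trigger is reached
      have hdrop : g.drop s.toNat ≠ [] := by
        intro h
        have := List.drop_eq_nil_iff.mp h
        omega
      obtain ⟨h, t, hht⟩ := List.exists_cons_of_ne_nil hdrop
      by_cases hn : n < 1
      · -- limit < 1: A collects nothing, B's guard fires
        have hguard : (¬(0 ≤ s ∧ s < ((g.map (fun l => (l, pvIdOf l))).length : Int)) ∨ n < 1) := Or.inr hn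
        rw [if_pos hguard, hA, pvNE_pre s n g 0 [] hs0]
        simp only [show s - 0 = s by ring, hht]
        have hn' : ¬ (1 : Int) ≤ n := by omega
        have hstep : pvNE s n (h :: t) s [] [] 0 0 = pvNE s n t (s+1) [] (pvIdOf h) 1 0 := by
          simp [pvNE, hn']
        rw [hstep, pvNE_dead s n t (s+1) [] (pvIdOf h) 1 0 (by omega) (by omega)]
      · -- main path: trigger fires, B walks the tagged slice
        push_neg at hn
        have hguard : ¬ (¬(0 ≤ s ∧ s < ((g.map (fun l => (l, pvIdOf l))).length : Int)) ∨ n < 1) := by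
          simp only [List.length_map]
          omega
        rw [if_neg hguard, hA, pvNE_pre s n g 0 [] hs0]
        simp only [show s - 0 = s by ring, hht]
        have hmapdrop : (g.map (fun l => (l, pvIdOf l))).drop s.toNat
            = (h, pvIdOf h) :: t.map (fun l => (l, pvIdOf l)) := by
          rw [← List.map_drop, hht, List.map_cons]
        rw [hmapdrop]
        have hstep : pvNE s n (h :: t) s [] [] 0 0 = pvNE s n t (s+1) [h] (pvIdOf h) 1 0 := by
          simp [pvNE, hn]
        rw [hstep, pvNE_main s n t (s+1) [h] (pvIdOf h) 1 0 (by omega) (by omega) hn]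
        simp only [pvBLoop]
        rw [if_pos (show some (pvIdOf h) ≠ (none : Option (List Char)) by simp),
          if_neg (show ¬ ((0 : Int) + 1 > n) by omega)]
        norm_num
    · -- start beyond the non-empty lines: never triggered
      have hguard : (¬(0 ≤ s ∧ s < ((g.map (fun l => (l, pvIdOf l))).length : Int)) ∨ n < 1) := by
        left; simp only [List.length_map]; omega
      rw [if_pos hguard, hA, pvNE_pre s n g 0 [] hs0]
      have hdrop : g.drop s.toNat = [] := by
        apply List.drop_eq_nil_iff.mpr; omega
      simp only [show s - 0 = s by ring, hdrop, pvNE]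
  · -- negative start: never triggered
    have hguard : (¬(0 ≤ s ∧ s < ((g.map (fun l => (l, pvIdOf l))).length : Int)) ∨ n < 1) := by
      left; simp only [List.length_map]; omega
    rw [if_pos hguard, hA, pvNE_dead s n g 0 [] [] 0 0 (by omega) (by omega)]
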